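-- pv_equiv track=rewrite | github.com/franklinparkllc/AI-timeline | scripts/generate_timeline.py | _sanitize_link
-- ===== SOURCE A (Python) =====
-- def _sanitize_link(link: str) -> str:
--     """
--     Ensure link is a single URL; strip any trailing comma + weight that bled in.
--
--     Args:
--         link: Link string that may contain trailing weight data
--
--     Returns:
--         Cleaned link string
--     """
--     if not link:
--         return ''
--     link = link.strip()
--     # If link ends with comma + digits (weight bled in), remove it
--     if link and link[-1].isdigit():
--         i = len(link) - 1
--         while i >= 0 and link[i].isdigit():
--             i -= 1
--         if i >= 0 and link[i] == ',':
--             link = link[:i].strip()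
--     return link if link.startswith(('http://', 'https://')) else link
-- ===== SOURCE B (Python) =====
-- def _sanitize_link(link: str) -> str:
--     """Strip a trailing ',<digits>' weight from the stripped link, via rpartition."""
--     if not link:
--         return ''
--     link = link.strip()
--     head, sep, tail = link.rpartition(',')
--     if sep and tail and tail.isdigit():
--         return head.strip()
--     return link
-- ===== Notes on version B (the rewrite author's own statement) =====
-- stated objective: idiomatic
-- what changed: Replaces the manual backward index walk over trailing digits with a single str.rpartition(',') split followed by a digit test on the tail.
import Mathlib
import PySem

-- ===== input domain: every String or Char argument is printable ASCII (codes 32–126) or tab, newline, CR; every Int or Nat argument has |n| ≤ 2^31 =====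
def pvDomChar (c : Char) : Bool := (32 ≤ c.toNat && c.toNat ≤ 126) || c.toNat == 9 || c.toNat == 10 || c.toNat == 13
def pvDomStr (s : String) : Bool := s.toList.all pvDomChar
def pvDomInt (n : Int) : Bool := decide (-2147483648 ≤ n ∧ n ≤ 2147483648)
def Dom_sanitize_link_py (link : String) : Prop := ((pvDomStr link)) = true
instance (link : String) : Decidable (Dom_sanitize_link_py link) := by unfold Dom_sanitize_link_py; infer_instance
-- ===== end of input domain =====

-- B replaces A's manual backward index walk with a single rpartition(',') split: idiomatic, same cost.

-- ===== PORT A =====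
-- while i >= 0 and link[i].isdigit(): i -= 1   (nested ifs = Python's short-circuit 'and')
def pvAScan (cs : List Char) (i : Int) : Int :=
  if h : 0 ≤ i then
    if PySem.Chars.isdigit (PySem.List.pyGetD cs i ' ') = true then
      pvAScan cs (i - 1)
    else i
  else i
termination_by (i + 1).toNat
decreasing_by omega

def sanitize_link_py (link : String) : String :=
  if link == "" then ""
  else
    let cs := (PySem.Str.strip link).toList
    let cs2 :=
      if cs ≠ [] ∧ PySem.Chars.isdigit (PySem.List.pyGetD cs (-1) ' ') = true then
        let i := pvAScan cs ((cs.length : Int) - 1)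
        if 0 ≤ i ∧ PySem.List.pyGetD cs i ' ' = ',' then
          PySem.Chars.strip (PySem.List.slice cs none (some i))
        else cs
      else cs
    -- return link if link.startswith(('http://','https://')) else link
    if PySem.Chars.startswith cs2 "http://".toList || PySem.Chars.startswith cs2 "https://".toList
    then String.ofList cs2 else String.ofList cs2

-- ===== PORT B =====
-- link.rpartition(',') ported by hand (exact for a one-char separator): split the REVERSED
-- characters at the first ',' — tailRev = the tail after the last ',' (reversed), rest = ',' :: head reversed.
def sanitize_link_py_alt (link : String) : String :=
  if link == "" then ""
  else
    let cs := (PySem.Str.strip link).toList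
    let rev := cs.reverse
    let tailRev := rev.takeWhile (fun c => c ≠ ',')
    let rest := rev.dropWhile (fun c => c ≠ ',')
    -- 'if sep and tail and tail.isdigit()': rest ≠ [] ↔ sep ≠ ''; strIsdigit covers the 'tail and' part
    if rest ≠ [] ∧ PySem.Chars.strIsdigit tailRev = true then
      String.ofList (PySem.Chars.strip rest.tail.reverse)
    else String.ofList cs

-- ===== PRECONDITION & SPEC =====
def Spec_sanitize_link_py (link : String) (out : String) : Prop := out = sanitize_link_py_alt link
instance (link : String) (out : String) : Decidable (Spec_sanitize_link_py link out) := by unfold Spec_sanitize_link_py; infer_instance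

-- ===== CLAIM (what is proved, stated in full; the proofs are below) =====
def Claim_equal_sanitize_link_py : Prop := ∀ (link : String), Dom_sanitize_link_py link → Spec_sanitize_link_py link (sanitize_link_py link)

-- ===== LEMMAS AND PROOFS =====

theorem pvAScan_append (xs ys : List Char) :
    ∀ (n : Nat) (i : Int), (i + 1).toNat = n → i < (xs.length : Int) →
      pvAScan (xs ++ ys) i = pvAScan xs i := by
  intro n
  induction n using Nat.strong_induction_on with
  | _ n ih =>
    intro i hn hi
    conv_lhs => rw [pvAScan.eq_def]
    conv_rhs => rw [pvAScan.eq_def]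
    by_cases h0 : 0 ≤ i
    · have hlt : i.toNat < xs.length := by omega
      have hget : PySem.List.pyGetD (xs ++ ys) i ' ' = PySem.List.pyGetD xs i ' ' := by
        rw [PySem.List.pyGetD_eq_getElem _ _ h0 (by simp; omega),
            PySem.List.pyGetD_eq_getElem _ _ h0 (by omega)]
        exact List.getElem_append_left hlt
      rw [dif_pos h0, dif_pos h0, hget]
      by_cases hd : PySem.Chars.isdigit (PySem.List.pyGetD xs i ' ') = true
      · rw [if_pos hd, if_pos hd]
        exact ih i.toNat (by omega) (i - 1) (by omega) (by omega)
      · rw [if_neg hd, if_neg hd]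
    · rw [dif_neg h0, dif_neg h0]

theorem pvAScan_all_digits (ds xs : List Char)
    (hd : ∀ c ∈ ds, PySem.Chars.isdigit c = true) :
    pvAScan (xs ++ ds) ((xs.length : Int) + ds.length - 1) = pvAScan xs ((xs.length : Int) - 1) := by
  induction ds using List.reverseRecOn with
  | nil => simp
  | append_singleton ds c ih =>
    have hc : PySem.Chars.isdigit c = true := hd c (by simp)
    have hih := ih (fun c' hc' => hd c' (by simp [hc']))
    rw [← List.append_assoc]
    have hidx : (xs.length : Int) + ((ds ++ [c]).length : Int) - 1 = ((xs ++ ds).length : Int) := by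
      simp only [List.length_append, List.length_cons, List.length_nil]
      push_cast
      omega
    rw [hidx]
    conv_lhs => rw [pvAScan.eq_def]
    have h0 : (0:Int) ≤ ((xs ++ ds).length : Int) := Int.natCast_nonneg _
    rw [dif_pos h0]
    have hget : PySem.List.pyGetD ((xs ++ ds) ++ [c]) (((xs ++ ds).length : Int)) ' ' = c := by
      rw [PySem.List.pyGetD_eq_getElem _ _ h0 (by simp)]
      simp only [Int.toNat_natCast]
      exact List.getElem_concat_length rfl _
    rw [hget, if_pos hc]
    rw [pvAScan_append (xs ++ ds) [c] ((((xs ++ ds).length : Int) - 1) + 1).toNat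
        (((xs ++ ds).length : Int) - 1) rfl (by omega)]
    have hidx2 : ((xs ++ ds).length : Int) - 1 = (xs.length : Int) + (ds.length : Int) - 1 := by
      simp only [List.length_append]
      push_cast
      omega
    rw [hidx2, hih]

theorem pvAScan_stop (xs : List Char)
    (h : ∀ hne : xs ≠ [], PySem.Chars.isdigit (xs.getLast hne) = false) :
    pvAScan xs ((xs.length : Int) - 1) = (xs.length : Int) - 1 := by
  rcases eq_or_ne xs [] with he | hne
  · subst he; rw [pvAScan]; norm_num
  · have hpos : 0 < xs.length := List.length_pos_iff.mpr hne
    have h0 : (0:Int) ≤ (xs.length : Int) - 1 := by omega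
    rw [pvAScan, dif_pos h0]
    have hget : PySem.List.pyGetD xs ((xs.length : Int) - 1) ' ' = xs.getLast hne := by
      rw [PySem.List.pyGetD_eq_getElem _ _ h0 (by omega)]
      have hn : ((xs.length : Int) - 1).toNat = xs.length - 1 := by omega
      simp only [hn]
      exact (List.getLast_eq_getElem hne).symm
    rw [hget, if_neg (by simp [h hne])]

theorem pv_takeWhile_append_all {α} (p : α → Bool) (a b : List α) (ha : ∀ c ∈ a, p c = true) :
    (a ++ b).takeWhile p = a ++ b.takeWhile p := by
  induction a with
  | nil => simp
  | cons x xs ih =>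
    have hx : p x = true := ha x (List.mem_cons_self)
    simp only [List.cons_append, List.takeWhile_cons, hx, if_true]
    rw [ih (fun c hc => ha c (List.mem_cons_of_mem _ hc))]

theorem pv_dropWhile_append_all {α} (p : α → Bool) (a b : List α) (ha : ∀ c ∈ a, p c = true) :
    (a ++ b).dropWhile p = b.dropWhile p := by
  induction a with
  | nil => simp
  | cons x xs ih =>
    have hx : p x = true := ha x (List.mem_cons_self)
    simp only [List.cons_append, List.dropWhile_cons, hx, if_true]
    exact ih (fun c hc => ha c (List.mem_cons_of_mem _ hc))

theorem pv_digit_ne_comma (c : Char) (hc : PySem.Chars.isdigit c = true) : c ≠ ',' := by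
  rintro rfl; exact absurd hc (by decide)

theorem pv_core (cs : List Char) :
    (if cs ≠ [] ∧ PySem.Chars.isdigit (PySem.List.pyGetD cs (-1) ' ') = true then
        let i := pvAScan cs ((cs.length : Int) - 1)
        if 0 ≤ i ∧ PySem.List.pyGetD cs i ' ' = ',' then
          PySem.Chars.strip (PySem.List.slice cs none (some i))
        else cs
      else cs)
    = (if cs.reverse.dropWhile (fun c => c ≠ ',') ≠ [] ∧
          PySem.Chars.strIsdigit (cs.reverse.takeWhile (fun c => c ≠ ',')) = true then
        PySem.Chars.strip (cs.reverse.dropWhile (fun c => c ≠ ',')).tail.reverse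
      else cs) := by
  obtain ⟨rv, rfl⟩ : ∃ rv, cs = rv.reverse := ⟨cs.reverse, (List.reverse_reverse cs).symm⟩
  rw [List.reverse_reverse]
  rcases rv with _ | ⟨x, rest⟩
  · simp
  · have hguard : PySem.List.pyGetD ((x :: rest).reverse) (-1) ' ' = x := by
      rw [show (x :: rest).reverse = rest.reverse ++ [x] by simp]
      exact PySem.List.pyGetD_neg_one_append_singleton _ _ _
    have hne : (x :: rest).reverse ≠ [] := by simp
    by_cases hx : PySem.Chars.isdigit x = true
    · rw [if_pos ⟨hne, by rw [hguard]; exact hx⟩]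
      have hsplit : List.takeWhile PySem.Chars.isdigit (x :: rest) ++
          List.dropWhile PySem.Chars.isdigit (x :: rest) = x :: rest :=
        List.takeWhile_append_dropWhile
      have hdall : ∀ c ∈ List.takeWhile PySem.Chars.isdigit (x :: rest),
          PySem.Chars.isdigit c = true := fun c hc => List.mem_takeWhile_imp hc
      have hdq : ∀ c ∈ List.takeWhile PySem.Chars.isdigit (x :: rest),
          (fun c => decide (c ≠ ',')) c = true := fun c hc => by
        simpa using pv_digit_ne_comma c (hdall c hc)
      have hgt : List.takeWhile PySem.Chars.isdigit (x :: rest) =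
          x :: List.takeWhile PySem.Chars.isdigit rest := by
        rw [List.takeWhile_cons, if_pos hx]
      have hF1 : pvAScan ((x :: rest).reverse) (((x :: rest).reverse.length : Int) - 1)
          = ((List.dropWhile PySem.Chars.isdigit (x :: rest)).length : Int) - 1 := by
        have hcs : (x :: rest).reverse =
            (List.dropWhile PySem.Chars.isdigit (x :: rest)).reverse ++
            (List.takeWhile PySem.Chars.isdigit (x :: rest)).reverse := by
          rw [← List.reverse_append, hsplit]
        have hlast : ∀ hne' : (List.dropWhile PySem.Chars.isdigit (x :: rest)).reverse ≠ [],
            PySem.Chars.isdigit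
              ((List.dropWhile PySem.Chars.isdigit (x :: rest)).reverse.getLast hne') = false := by
          intro hne'
          rw [List.getLast_reverse]
          exact List.head_dropWhile_not _ _
        have hstop := pvAScan_stop _ hlast
        rw [hcs]
        rw [show (((List.dropWhile PySem.Chars.isdigit (x :: rest)).reverse ++
            (List.takeWhile PySem.Chars.isdigit (x :: rest)).reverse).length : Int) - 1 =
            ((List.dropWhile PySem.Chars.isdigit (x :: rest)).reverse.length : Int) +
            ((List.takeWhile PySem.Chars.isdigit (x :: rest)).reverse.length : Int) - 1 by
          simp only [List.length_append]
          push_cast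
          omega]
        rw [pvAScan_all_digits _ _
          (fun c hc => hdall c (List.mem_reverse.mp hc))]
        simpa using hstop
      simp only [hF1]
      rcases hgd : List.dropWhile PySem.Chars.isdigit (x :: rest) with _ | ⟨y, R'⟩
      · rw [if_neg (by rintro ⟨h0, -⟩; exact absurd h0 (by decide))]
        rw [if_neg]
        rintro ⟨hu, -⟩
        apply hu
        apply List.dropWhile_eq_nil_iff.mpr
        rw [hgd, List.append_nil] at hsplit
        intro c hc
        simpa using pv_digit_ne_comma c (hdall c (by rw [hsplit]; exact hc))
      · have hRne : List.dropWhile PySem.Chars.isdigit (x :: rest) ≠ [] := by rw [hgd]; simp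
        have hpy : PySem.Chars.isdigit y = false := by
          have h1 := List.head_dropWhile_not PySem.Chars.isdigit hRne
          simp only [hgd, List.head_cons] at h1
          exact h1
        have hcs2 : (x :: rest).reverse = (R'.reverse ++ [y]) ++
            (List.takeWhile PySem.Chars.isdigit (x :: rest)).reverse := by
          conv_lhs => rw [← hsplit, hgd]
          simp [List.reverse_append]
        have hlen1 : ((y :: R' : List Char).length : Int) - 1 = (R'.length : Int) := by simp
        have hgety : PySem.List.pyGetD ((x :: rest).reverse)
            (((y :: R' : List Char).length : Int) - 1) ' ' = y := by
          rw [hcs2, hlen1]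
          rw [PySem.List.pyGetD_eq_getElem _ _ (Int.natCast_nonneg _) (by
            simp only [List.length_append, List.length_reverse, List.length_cons,
              List.length_nil]
            push_cast
            omega)]
          simp only [Int.toNat_natCast]
          rw [List.getElem_append_left (by
            simp only [List.length_append, List.length_reverse, List.length_cons,
              List.length_nil]
            omega)]
          exact List.getElem_concat_length (by simp) _
        by_cases hyq : y = ','
        · subst hyq
          have ht : List.takeWhile (fun c => decide (c ≠ ',')) (x :: rest) =
              List.takeWhile PySem.Chars.isdigit (x :: rest) := by
            conv_lhs => rw [← hsplit, hgd]
            rw [pv_takeWhile_append_all _ _ _ hdq, List.takeWhile_cons]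
            simp
          have hu : List.dropWhile (fun c => decide (c ≠ ',')) (x :: rest) = ',' :: R' := by
            conv_lhs => rw [← hsplit, hgd]
            rw [pv_dropWhile_append_all _ _ _ hdq, List.dropWhile_cons]
            simp
          have hBcond : (List.dropWhile (fun c => decide (c ≠ ',')) (x :: rest) ≠ []) ∧
              PySem.Chars.strIsdigit
                (List.takeWhile (fun c => decide (c ≠ ',')) (x :: rest)) = true := by
            refine ⟨by rw [hu]; simp, ?_⟩
            rw [ht, hgt]
            simp only [PySem.Chars.strIsdigit, List.isEmpty_cons, Bool.not_false,
              Bool.true_and, List.all_eq_true]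
            intro c hc
            exact hdall c (by rw [hgt]; exact hc)
          rw [if_pos ⟨by rw [hlen1]; exact Int.natCast_nonneg _, hgety⟩, if_pos hBcond, hu,
            List.tail_cons]
          congr 1
          rw [PySem.List.slice_to]
          · rw [show ((((',' :: R' : List Char)).length : Int) - 1).toNat = R'.length by simp]
            rw [hcs2, List.append_assoc]
            exact List.take_left' (by simp)
          · rw [hlen1]; exact Int.natCast_nonneg _
        · rw [if_neg (by rintro ⟨-, hc⟩; rw [hgety] at hc; exact hyq hc)]
          rw [if_neg]
          rintro ⟨-, ht⟩
          have htexp : List.takeWhile (fun c => decide (c ≠ ',')) (x :: rest) =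
              List.takeWhile PySem.Chars.isdigit (x :: rest) ++
              y :: List.takeWhile (fun c => decide (c ≠ ',')) R' := by
            conv_lhs => rw [← hsplit, hgd]
            rw [pv_takeWhile_append_all _ _ _ hdq, List.takeWhile_cons]
            simp [hyq]
          rw [htexp] at ht
          simp only [PySem.Chars.strIsdigit, Bool.and_eq_true, List.all_eq_true] at ht
          have hyd := ht.2 y (by simp)
          rw [hpy] at hyd
          exact Bool.false_ne_true hyd
    · rw [if_neg (by rintro ⟨-, hdig⟩; rw [hguard] at hdig; exact hx hdig)]
      rw [if_neg]
      rintro ⟨-, ht⟩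
      by_cases hxq : x = ','
      · rw [show List.takeWhile (fun c => decide (c ≠ ',')) (x :: rest) = [] by
          rw [List.takeWhile_cons]; simp [hxq]] at ht
        exact absurd ht (by decide)
      · rw [show List.takeWhile (fun c => decide (c ≠ ',')) (x :: rest) =
            x :: List.takeWhile (fun c => decide (c ≠ ',')) rest by
          rw [List.takeWhile_cons, if_pos (by simpa using hxq)]] at ht
        simp only [PySem.Chars.strIsdigit, Bool.and_eq_true, List.all_eq_true] at ht
        exact hx (ht.2 x (by simp))

-- ===== VERDICT (by name: the statement is the Claim_ definition above) =====
theorem sanitize_link_py_spec : Claim_equal_sanitize_link_py := by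
  intro link _
  unfold Spec_sanitize_link_py sanitize_link_py sanitize_link_py_alt
  by_cases h : link = ""
  · simp [h]
  · simp only [h, ite_self, beq_iff_eq, if_false]
    rw [pv_core]
    exact apply_ite String.ofList _ _ _
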